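-- pv_equiv track=rewrite | github.com/MOV-AI/mobros-build-system | mobros/dependency_manager/dependency_manager.py | find_equals_rule
-- ===== SOURCE A (Python) =====
-- def find_equals_rule(version_rules):
--     """Function to find the first 'equals' rule of a dependency.
--
--     Args:
--         version_rules (list): list of all version rules from the workspace
--
--     Returns:
--         found: boolean that defines the success of the search
--         version_rule: the first 'equals' rule within the list or None if no 'equals' rule found
--     """
--     equals_rule = {}
--     for rule in version_rules:
--         if "version_eq" == rule["operator"]:
--             equals_rule = rule
--
--     if equals_rule == {}:
--         return False, None
--
--     return True, equals_rule
-- ===== SOURCE B (Python) =====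
-- def find_equals_rule(version_rules):
--     """Function to find the first 'equals' rule of a dependency.
--
--     Scans from the end and returns on the first 'version_eq' rule found
--     (= the last one in original order); no sentinel dict needed.
--     """
--     for rule in reversed(version_rules):
--         if rule["operator"] == "version_eq":
--             return True, rule
--     return False, None
-- ===== Notes on version B (the rewrite author's own statement) =====
-- stated objective: idiomatic
-- what changed: Replaces the forward full scan that keeps overwriting a {} sentinel with a reverse scan that returns immediately on the first match (the last matching rule), eliminating the sentinel and the post-loop equality test.
import Mathlib
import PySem

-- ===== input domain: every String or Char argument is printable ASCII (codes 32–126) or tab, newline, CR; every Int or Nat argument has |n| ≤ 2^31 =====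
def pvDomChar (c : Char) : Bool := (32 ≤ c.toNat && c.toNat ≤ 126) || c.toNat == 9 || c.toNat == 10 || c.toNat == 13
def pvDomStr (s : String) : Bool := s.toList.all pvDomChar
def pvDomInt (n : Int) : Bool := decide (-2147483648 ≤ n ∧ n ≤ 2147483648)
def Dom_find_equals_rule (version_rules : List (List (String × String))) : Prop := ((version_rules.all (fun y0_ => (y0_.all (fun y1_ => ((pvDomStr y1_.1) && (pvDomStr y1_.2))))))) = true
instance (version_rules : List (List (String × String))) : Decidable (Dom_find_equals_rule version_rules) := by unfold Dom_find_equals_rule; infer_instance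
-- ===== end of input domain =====

-- B: reverse scan returning on the first 'version_eq' rule (the last one in original order),
-- instead of A's forward scan overwriting a {} sentinel; same O(n) cost, plainer shape.


-- ===== PORT A =====
-- rule["operator"]: dict lookup = first match in the association list (List.lookup);
-- 'none' is Python's KeyError, excluded by Pre_ below (the loop then skips, unreachable on Pre_).
def find_equals_rule_loop : List (List (String × String)) → List (String × String) → List (String × String)
  | [], equals_rule => equals_rule
  | rule :: rest, equals_rule =>
    match List.lookup "operator" rule with
    | some op => find_equals_rule_loop rest (if "version_eq" == op then rule else equals_rule)
    | none => find_equals_rule_loop rest equals_rule  -- KeyError in Python: outside Pre_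

def find_equals_rule (version_rules : List (List (String × String))) : Bool × (Option (List (String × String))) :=
  let equals_rule := find_equals_rule_loop version_rules []
  if equals_rule == [] then (false, none) else (true, some equals_rule)

-- ===== PORT B =====
def find_equals_rule_find : List (List (String × String)) → Bool × (Option (List (String × String)))
  | [] => (false, none)
  | rule :: rest =>
    match List.lookup "operator" rule with
    | some op => if op == "version_eq" then (true, some rule) else find_equals_rule_find rest
    | none => find_equals_rule_find rest  -- KeyError in Python: outside Pre_

def find_equals_rule_alt (version_rules : List (List (String × String))) : Bool × (Option (List (String × String))) :=
  find_equals_rule_find version_rules.reverse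

-- ===== PRECONDITION & SPEC =====
-- Pre_ excludes exactly the inputs on which Python A raises KeyError: a rule without an "operator" key.
def Pre_find_equals_rule (version_rules : List (List (String × String))) : Prop :=
  ∀ rule ∈ version_rules, (List.lookup "operator" rule).isSome
instance (version_rules : List (List (String × String))) : Decidable (Pre_find_equals_rule version_rules) := by unfold Pre_find_equals_rule; infer_instance
def pvWitness_find_equals_rule : (List (List (String × String))) := [[("operator", "version_eq"), ("version", "1.0")], [("operator", "version_lt")]]

def Spec_find_equals_rule (version_rules : List (List (String × String))) (out : Bool × (Option (List (String × String)))) : Prop := out = find_equals_rule_alt version_rules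
instance (version_rules : List (List (String × String))) (out : Bool × (Option (List (String × String)))) : Decidable (Spec_find_equals_rule version_rules out) := by unfold Spec_find_equals_rule; infer_instance

-- ===== CLAIM (what is proved, stated in full; the proofs are below) =====
def Claim_equal_find_equals_rule : Prop := ∀ (version_rules : List (List (String × String))), Dom_find_equals_rule version_rules → Pre_find_equals_rule version_rules → Spec_find_equals_rule version_rules (find_equals_rule version_rules)

-- ===== LEMMAS AND PROOFS =====

-- B's scan over an appended list: the left part wins if it finds a match.
theorem find_append (ys zs : List (List (String × String))) :
    find_equals_rule_find (ys ++ zs) =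
      if (find_equals_rule_find ys).1 then find_equals_rule_find ys else find_equals_rule_find zs := by
  induction ys with
  | nil => simp [find_equals_rule_find]
  | cons r rest ih =>
    simp only [List.cons_append, find_equals_rule_find]
    cases h : List.lookup "operator" r with
    | none => simpa [h] using ih
    | some op =>
      by_cases hop : op == "version_eq" <;> simp [hop, ih]

-- a matched rule is a nonempty association list
theorem lookup_ne_nil {rule : List (String × String)} {op : String}
    (h : List.lookup "operator" rule = some op) : rule ≠ [] := by
  intro hnil; subst hnil; simp [List.lookup] at h

-- B's scan returns either (false, none) or (true, some r) with r a nonempty matched rule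
theorem find_shape (xs : List (List (String × String))) :
    find_equals_rule_find xs = (false, none) ∨
      ∃ r, r ≠ [] ∧ find_equals_rule_find xs = (true, some r) := by
  induction xs with
  | nil => left; rfl
  | cons rule rest ih =>
    simp only [find_equals_rule_find]
    cases h : List.lookup "operator" rule with
    | none => exact ih
    | some op =>
      by_cases hop : op == "version_eq"
      · right; exact ⟨rule, lookup_ne_nil h, by simp [hop]⟩
      · simpa [hop] using ih

-- invariant of A's loop vs B's reverse scan
theorem loop_find (rules : List (List (String × String))) (acc : List (String × String)) :
    find_equals_rule_loop rules acc =
      match find_equals_rule_find rules.reverse with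
      | (true, some r) => r
      | _ => acc := by
  induction rules generalizing acc with
  | nil => simp [find_equals_rule_loop, find_equals_rule_find]
  | cons rule rest ih =>
    simp only [List.reverse_cons, find_equals_rule_loop, find_append]
    cases h : List.lookup "operator" rule with
    | none =>
      simp only [ih]
      rcases find_shape rest.reverse with hf | ⟨r, -, hf⟩ <;>
        simp [hf, find_equals_rule_find, h]
    | some op =>
      have hsymm : ("version_eq" == op) = (op == "version_eq") := by
        by_cases he : op = "version_eq" <;> simp [he, Ne.symm]
      by_cases hop : op == "version_eq" <;>
        · simp only [hsymm, hop, if_true, ih]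
          rcases find_shape rest.reverse with hf | ⟨r, -, hf⟩ <;>
            simp [hf, find_equals_rule_find, h, hop]

-- ===== VERDICT (by name: the statement is the Claim_ definition above) =====
theorem find_equals_rule_spec : Claim_equal_find_equals_rule := by
  intro rules _ _
  unfold Spec_find_equals_rule find_equals_rule find_equals_rule_alt
  simp only [loop_find]
  rcases find_shape rules.reverse with hf | ⟨r, hr, hf⟩
  · simp [hf]
  · simp [hf, hr]
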